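-- pv_equiv track=rewrite | github.com/jk-jung/problem-solving | codewars/6kyu/6_Sort Strings by Most Contiguous Vowels.py | sort_strings_by_vowels
-- ===== SOURCE A (Python) =====
-- def sort_strings_by_vowels(s):
--     def f(x):
--         r, c = 0, 0
--         for y in x[1].lower():
--             if y in 'aeiou': c +=1
--             else: c = 0
--             r = max(r, c)
--         return (-r, x[0])
--     return [x[1] for x in sorted(enumerate(s), key=f)]
-- ===== SOURCE B (Python) =====
-- def sort_strings_by_vowels(s):
--     def key(x):
--         masked = ''.join(c if c in 'aeiou' else ' ' for c in x.lower())
--         return -max(map(len, masked.split()), default=0)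
--     return sorted(s, key=key)
-- ===== Notes on version B (the rewrite author's own statement) =====
-- stated objective: idiomatic
-- what changed: B extracts the maximal vowel runs explicitly (mask non-vowels to spaces, split, take the max run length) instead of A's running counter/running max, and sorts the strings directly with a single negative key relying on sort stability instead of A's enumerate-with-index tiebreaker.
import Mathlib
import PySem

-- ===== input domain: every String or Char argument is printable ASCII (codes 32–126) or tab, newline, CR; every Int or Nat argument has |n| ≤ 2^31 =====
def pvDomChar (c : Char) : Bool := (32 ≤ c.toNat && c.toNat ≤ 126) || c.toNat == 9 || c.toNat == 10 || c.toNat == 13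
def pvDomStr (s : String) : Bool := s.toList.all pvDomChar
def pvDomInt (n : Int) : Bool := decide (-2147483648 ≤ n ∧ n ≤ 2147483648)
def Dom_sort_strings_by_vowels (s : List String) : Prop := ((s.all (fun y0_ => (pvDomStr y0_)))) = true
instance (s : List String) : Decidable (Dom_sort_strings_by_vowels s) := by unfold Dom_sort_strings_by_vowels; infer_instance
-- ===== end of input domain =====

-- B computes the max contiguous vowel run by masking non-vowels and splitting instead of A's
-- running counter, and sorts directly with a stable single-key sort instead of A's
-- enumerate-with-index tiebreaker (objective: idiomatic; same cost).

-- ===== PORT A =====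
-- A's inner f: running counter c of current vowel run, running max r, over the lowered string.
def pvArun (x : String) : Int :=
  (List.foldl
    (fun rc y =>
      let c : Int := if ['a', 'e', 'i', 'o', 'u'].contains y then rc.2 + 1 else 0
      (max rc.1 c, c))
    ((0 : Int), (0 : Int)) (PySem.Str.lower x).toList).1

def sort_strings_by_vowels (s : List String) : List String :=
  (PySem.List.sorted2 (PySem.List.enumerate s)
      (fun x => -(pvArun x.2)) (fun x => x.1)).map (fun x => x.2)

-- ===== PORT B =====
-- B's key: mask non-vowels of the lowered string to spaces, split on whitespace,
-- negate the max piece length (default 0).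
def pvBkey (x : String) : Int :=
  let masked : List Char :=
    (PySem.Str.lower x).toList.map (fun c => if ['a', 'e', 'i', 'o', 'u'].contains c then c else ' ')
  let lens : List Nat := (PySem.Chars.split₀ masked).map List.length
  let m : Nat := (PySem.List.max? lens (fun y => y)).getD 0;
  -(m : Int)

def sort_strings_by_vowels_alt (s : List String) : List String :=
  PySem.List.sorted s pvBkey

-- ===== PRECONDITION & SPEC =====
def Spec_sort_strings_by_vowels (s : List String) (out : List String) : Prop := out = sort_strings_by_vowels_alt s
instance (s : List String) (out : List String) : Decidable (Spec_sort_strings_by_vowels s out) := by unfold Spec_sort_strings_by_vowels; infer_instance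

-- ===== CLAIM (what is proved, stated in full; the proofs are below) =====
def Claim_equal_sort_strings_by_vowels : Prop := ∀ (s : List String), Dom_sort_strings_by_vowels s → Spec_sort_strings_by_vowels s (sort_strings_by_vowels s)

-- ===== LEMMAS AND PROOFS =====

-- max of the word lengths of a list of words, 0 if none (Int-valued)
def pvMaxAcc : List (List Char) → Int
  | [] => 0
  | w :: t => max (w.length : Int) (pvMaxAcc t)

theorem pvMaxAcc_nonneg (l : List (List Char)) : 0 ≤ pvMaxAcc l := by
  induction l with
  | nil => simp [pvMaxAcc]
  | cons w t ih => simp only [pvMaxAcc]; omega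

theorem pvMaxAcc_append (a b : List (List Char)) :
    pvMaxAcc (a ++ b) = max (pvMaxAcc a) (pvMaxAcc b) := by
  induction a with
  | nil => have := pvMaxAcc_nonneg b; simp only [List.nil_append, pvMaxAcc]; omega
  | cons w t ih => simp only [List.cons_append, pvMaxAcc, ih]; omega

theorem pvMaxAcc_reverse (l : List (List Char)) : pvMaxAcc l.reverse = pvMaxAcc l := by
  induction l with
  | nil => rfl
  | cons w t ih =>
      simp [pvMaxAcc, List.reverse_cons, pvMaxAcc_append, ih]
      omega

-- A's loop step and B's masking function
def pvStep (rc : Int × Int) (y : Char) : Int × Int :=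
  let c : Int := if ['a', 'e', 'i', 'o', 'u'].contains y then rc.2 + 1 else 0
  (max rc.1 c, c)

def pvMask (c : Char) : Char := if ['a', 'e', 'i', 'o', 'u'].contains c then c else ' '

theorem pv_go_spec (cs cur : List Char) (acc : List (List Char)) :
    (List.foldl pvStep (max (pvMaxAcc acc) (cur.length : Int), (cur.length : Int)) cs).1
      = pvMaxAcc (PySem.Chars.split₀.go (cs.map pvMask) cur acc) := by
  induction cs generalizing cur acc with
  | nil =>
      cases cur with
      | nil =>
          have := pvMaxAcc_nonneg acc
          simp [PySem.Chars.split₀.go, pvMaxAcc_reverse]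
          omega
      | cons c t =>
          rw [show PySem.Chars.split₀.go (List.map pvMask []) (c :: t) acc
                = ((c :: t).reverse :: acc).reverse from rfl, pvMaxAcc_reverse]
          simp only [List.foldl_nil, pvMaxAcc, List.length_reverse]
          omega
  | cons ch cs ih =>
      by_cases hv : (['a', 'e', 'i', 'o', 'u'].contains ch) = true
      · have hsp : PySem.Chars.isspace (pvMask ch) = false := by
          simp only [pvMask, hv, if_true]
          have hmem : ch ∈ ['a', 'e', 'i', 'o', 'u'] := by simpa using hv
          fin_cases hmem <;> decide
        have hstep : pvStep (max (pvMaxAcc acc) (cur.length : Int), (cur.length : Int)) ch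
            = (max (pvMaxAcc acc) ((cur.length : Int) + 1), (cur.length : Int) + 1) := by
          simp only [pvStep, hv, if_true, Prod.mk.injEq]
          exact ⟨by omega, trivial⟩
        have ih' := ih (ch :: cur) acc
        simp only [List.length_cons] at ih'
        push_cast at ih'
        rw [List.map_cons, List.foldl_cons, hstep,
          show PySem.Chars.split₀.go (pvMask ch :: List.map pvMask cs) cur acc
             = PySem.Chars.split₀.go (List.map pvMask cs) (pvMask ch :: cur) acc from by
            simp [PySem.Chars.split₀.go, hsp],
          show pvMask ch = ch from by unfold pvMask; rw [if_pos hv]]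
        exact ih'
      · have hvb : (['a', 'e', 'i', 'o', 'u'].contains ch) = false := by
          revert hv; cases (['a', 'e', 'i', 'o', 'u'].contains ch) <;> simp
        have hm : pvMask ch = ' ' := by unfold pvMask; rw [if_neg hv]
        have hstep : pvStep (max (pvMaxAcc acc) (cur.length : Int), (cur.length : Int)) ch
            = (max (pvMaxAcc acc) (cur.length : Int), 0) := by
          have := pvMaxAcc_nonneg acc
          simp only [pvStep, hvb, Bool.false_eq_true, if_false, Prod.mk.injEq]
          exact ⟨by omega, trivial⟩
        cases cur with
        | nil =>
            have ih' := ih [] acc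
            rw [List.map_cons, List.foldl_cons, hstep, hm,
              show PySem.Chars.split₀.go (' ' :: List.map pvMask cs) [] acc
                 = PySem.Chars.split₀.go (List.map pvMask cs) [] acc from by
                simp [PySem.Chars.split₀.go, PySem.Chars.isspace]]
            simpa using ih'
        | cons c t =>
            have ih' := ih [] ((c :: t).reverse :: acc)
            simp only [List.length_nil, Nat.cast_zero] at ih'
            have hmx : max (pvMaxAcc ((c :: t).reverse :: acc)) (0 : Int)
                = max (pvMaxAcc acc) (((c :: t).length : Nat) : Int) := by
              have h1 := pvMaxAcc_nonneg acc
              simp [pvMaxAcc, List.length_reverse]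
              omega
            rw [List.map_cons, List.foldl_cons, hstep, hm,
              show PySem.Chars.split₀.go (' ' :: List.map pvMask cs) (c :: t) acc
                 = PySem.Chars.split₀.go (List.map pvMask cs) [] ((c :: t).reverse :: acc) from by
                simp [PySem.Chars.split₀.go, PySem.Chars.isspace]]
            rw [← hmx]
            exact ih'

-- B's max?-with-default equals pvMaxAcc
theorem pv_foldl_max_cast (t : List (List Char)) (a : Nat) :
    ((List.foldl max a (t.map List.length) : Nat) : Int) = max (a : Int) (pvMaxAcc t) := by
  induction t generalizing a with
  | nil => simp only [List.map_nil, List.foldl_nil, pvMaxAcc]; omega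
  | cons w t ih =>
      simp only [List.map_cons, List.foldl_cons, ih, pvMaxAcc]
      push_cast
      omega

theorem pv_maxD_eq (ws : List (List Char)) :
    (((PySem.List.max? (ws.map List.length) (fun y => y)).getD 0 : Nat) : Int) = pvMaxAcc ws := by
  cases ws with
  | nil => rfl
  | cons w t =>
      rw [List.map_cons, PySem.List.max?_id_cons]
      simp only [Option.getD_some]
      rw [pv_foldl_max_cast]
      simp [pvMaxAcc]

-- the two keys agree: pvBkey = -pvArun
theorem pv_key_eq (x : String) : pvBkey x = -(pvArun x) := by
  have h := pv_go_spec ((PySem.Str.lower x).toList) [] []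
  have h0 : (max (pvMaxAcc ([] : List (List Char))) ((([] : List Char).length : Nat) : Int),
      ((([] : List Char).length : Nat) : Int)) = ((0 : Int), (0 : Int)) := by simp [pvMaxAcc]
  rw [h0] at h
  show -((((PySem.List.max?
        ((PySem.Chars.split₀ (((PySem.Str.lower x).toList).map pvMask)).map List.length)
        (fun y => y)).getD 0 : Nat) : Int))
    = -((List.foldl pvStep ((0 : Int), (0 : Int)) (PySem.Str.lower x).toList).1)
  rw [pv_maxD_eq,
    show PySem.Chars.split₀ (((PySem.Str.lower x).toList).map pvMask)
       = PySem.Chars.split₀.go (((PySem.Str.lower x).toList).map pvMask) [] [] from rfl,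
    ← h]

-- decorate-sort-undecorate: inserting a maximal-index element commutes with dropping indices
theorem pv_insert_snd (k : String → Int) (acc : List (Int × String)) (n : Int) (x : String)
    (h : ∀ p ∈ acc, p.1 < n) :
    (PySem.List.insertBy
        (fun a b => decide (k a.2 < k b.2) || (!decide (k b.2 < k a.2) && decide (a.1 < b.1)))
        (n, x) acc).map (fun p => p.2)
      = PySem.List.insertBy (fun a b => decide (k a < k b)) x (acc.map (fun p => p.2)) := by
  induction acc with
  | nil => rfl
  | cons q t ih =>
      have hq : q.1 < n := h q (List.mem_cons_self ..)
      have hnq : decide (n < q.1) = false := by simp; omega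
      by_cases hk : k x < k q.2
      · simp [PySem.List.insertBy, hk, hnq]
      · have : (decide (k x < k q.2) || (!decide (k q.2 < k x) && decide (n < q.1))) = false := by
          simp [hk, hnq]
        simp only [PySem.List.insertBy, this, if_neg (by simp : ¬ (false = true)),
          decide_eq_true_eq, if_neg hk, List.map_cons]
        rw [ih (fun p hp => h p (List.mem_cons_of_mem _ hp))]

theorem pv_dsu (k : String → Int) (s : List String) (n : Int) (acc : List (Int × String))
    (h : ∀ p ∈ acc, p.1 < n) :
    (List.foldl
        (fun a p => PySem.List.insertBy
          (fun a b => decide (k a.2 < k b.2) || (!decide (k b.2 < k a.2) && decide (a.1 < b.1))) p a)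
        acc (PySem.List.enumerate s n)).map (fun p => p.2)
      = List.foldl (fun a x => PySem.List.insertBy (fun a b => decide (k a < k b)) x a)
          (acc.map (fun p => p.2)) s := by
  induction s generalizing n acc with
  | nil => simp [PySem.List.enumerate]
  | cons x t ih =>
      rw [PySem.List.enumerate_cons, List.foldl_cons, List.foldl_cons]
      rw [ih (n + 1) _ ?_, pv_insert_snd k acc n x h]
      intro p hp
      rcases (PySem.List.mem_insertBy ..).1 hp with h1 | h2
      · subst h1; omega
      · have := h p h2; omega

-- ===== VERDICT (by name: the statement is the Claim_ definition above) =====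
theorem sort_strings_by_vowels_spec : Claim_equal_sort_strings_by_vowels := by
  intro s _
  show sort_strings_by_vowels s = sort_strings_by_vowels_alt s
  unfold sort_strings_by_vowels sort_strings_by_vowels_alt
  simp only [PySem.List.sorted2, PySem.List.sorted, show (false = true) = False by simp, if_false]
  have := pv_dsu (fun x => -(pvArun x)) s 0 [] (by simp)
  simp only [List.map_nil] at this
  rw [this]
  have hk : pvBkey = fun x => -(pvArun x) := funext pv_key_eq
  rw [hk]
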